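-- pv_equiv track=rewrite | github.com/pypi-data/pypi-mirror-390 | packages/covet/covet-0.1.0b5-py3-none-any.whl/covet/security/password_security.py | _find_repeating_chars
-- ===== SOURCE A (Python) =====
-- from typing import Dict, List, Optional, Set, Tuple
--
-- def _find_repeating_chars(password: str, max_repeats: int) -> List[str]:
--     """Find sequences of repeating characters."""
--     repeating = []
--     i = 0
--     while i < len(password):
--         count = 1
--         while i + count < len(password) and password[i] == password[i + count]:
--             count += 1
--
--         if count > max_repeats:
--             repeating.append(password[i] * count)
--             i += count
--         else:
--             i += 1
--
--     return repeating
-- ===== SOURCE B (Python) =====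
-- def _find_repeating_chars(password: str, max_repeats: int):
--     """Find sequences of repeating characters: single pass, detect run boundaries."""
--     runs = []
--     n = len(password)
--     start = 0
--     for j in range(1, n + 1):
--         if j == n or password[j] != password[start]:
--             if j - start > max_repeats:
--                 runs.append(password[start:j])
--             start = j
--     return runs
-- ===== Notes on version B (the rewrite author's own statement) =====
-- stated objective: faster
-- what changed: A restarts its inner counting loop at every position of a run shorter than the threshold (re-scanning each short run once per start position); B makes a single pass that only compares each character with the start of the current run, emitting the run at its boundary.
import Mathlib
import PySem

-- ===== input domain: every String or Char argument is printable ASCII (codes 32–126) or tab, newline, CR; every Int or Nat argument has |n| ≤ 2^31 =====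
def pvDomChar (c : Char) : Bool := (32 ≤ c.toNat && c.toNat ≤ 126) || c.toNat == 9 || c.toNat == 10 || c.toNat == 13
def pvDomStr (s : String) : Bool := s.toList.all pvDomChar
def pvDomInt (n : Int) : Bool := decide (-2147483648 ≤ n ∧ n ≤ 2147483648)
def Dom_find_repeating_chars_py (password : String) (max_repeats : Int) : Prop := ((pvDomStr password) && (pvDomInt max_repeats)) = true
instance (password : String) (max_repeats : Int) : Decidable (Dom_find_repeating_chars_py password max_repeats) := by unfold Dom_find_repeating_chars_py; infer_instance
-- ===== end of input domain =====

-- B replaces A's restart-and-recount scan (inner while re-counting a run for every start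
-- position) by a single pass that only detects run boundaries; equal return values proved.

-- ===== PORT A =====
-- inner while: `while i + count < len(password) and password[i] == password[i+count]: count += 1`
def pvCountRun (chars : List Char) (i count : Nat) : Nat :=
  if i + count < chars.length ∧ chars[i]? = chars[i + count]? then
    pvCountRun chars i (count + 1)
  else count
termination_by chars.length - (i + count)
decreasing_by omega

theorem pvCountRun_ge (chars : List Char) (i count : Nat) : count ≤ pvCountRun chars i count := by
  fun_induction pvCountRun chars i count with
  | case1 _ _ ih => omega
  | case2 => omega

-- outer while loop of A; `password[i] * count` is `String.ofList (List.replicate count (chars.getD i ' '))`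
-- (i < chars.length holds whenever it is read, so the default ' ' is never used)
def pvLoopA (chars : List Char) (m : Int) (i : Nat) (acc : List String) : List String :=
  if i < chars.length then
    let count := pvCountRun chars i 1
    if (count : Int) > m then
      pvLoopA chars m (i + count) (acc ++ [String.ofList (List.replicate count (chars.getD i ' '))])
    else
      pvLoopA chars m (i + 1) acc
  else acc
termination_by chars.length - i
decreasing_by
  · have := pvCountRun_ge chars i 1; omega
  · omega

def find_repeating_chars_py (password : String) (max_repeats : Int) : List String :=
  pvLoopA password.toList max_repeats 0 []

-- ===== PORT B =====
-- the body of B's single `for j in range(1, n+1)` loop, state (start, runs);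
-- `password[start:j]` with 0 ≤ start < j ≤ n is exactly (chars.drop start).take (j - start)
def pvStepB (chars : List Char) (m : Int) (s : Nat × List String) (j : Nat) : Nat × List String :=
  if j = chars.length ∨ chars[j]? ≠ chars[s.1]? then
    (j, if ((j : Int) - (s.1 : Int)) > m
        then s.2 ++ [String.ofList ((chars.drop s.1).take (j - s.1))]
        else s.2)
  else s

def find_repeating_chars_py_alt (password : String) (max_repeats : Int) : List String :=
  let chars := password.toList
  ((List.range' 1 chars.length).foldl (pvStepB chars max_repeats) (0, [])).2

-- ===== PRECONDITION & SPEC =====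
def Spec_find_repeating_chars_py (password : String) (max_repeats : Int) (out : List String) : Prop := out = find_repeating_chars_py_alt password max_repeats
instance (password : String) (max_repeats : Int) (out : List String) : Decidable (Spec_find_repeating_chars_py password max_repeats out) := by unfold Spec_find_repeating_chars_py; infer_instance

-- ===== CLAIM (what is proved, stated in full; the proofs are below) =====
def Claim_equal_find_repeating_chars_py : Prop := ∀ (password : String) (max_repeats : Int), Dom_find_repeating_chars_py password max_repeats → Spec_find_repeating_chars_py password max_repeats (find_repeating_chars_py password max_repeats)

-- ===== LEMMAS AND PROOFS =====

-- common specification: the run-length decomposition of the string, emitting runs longer than m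
def pvRuns (m : Int) : List Char → List String
  | [] => []
  | c :: rest =>
    let k := (rest.takeWhile (· = c)).length
    (if ((k + 1 : Nat) : Int) > m then [String.ofList (List.replicate (k + 1) c)] else [])
      ++ pvRuns m (rest.drop k)
termination_by l => l.length
decreasing_by simp only [List.length_drop, List.length_cons]; omega

theorem pvRuns_nil (m : Int) : pvRuns m [] = [] := by rw [pvRuns]

theorem pvRuns_cons (m : Int) (c : Char) (rest : List Char) :
    pvRuns m (c :: rest) =
      (if (((rest.takeWhile (· = c)).length + 1 : Nat) : Int) > m
        then [String.ofList (List.replicate ((rest.takeWhile (· = c)).length + 1) c)] else [])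
      ++ pvRuns m (rest.drop ((rest.takeWhile (· = c)).length)) := by
  rw [pvRuns]

theorem tw_get (l : List Char) (c : Char) (j : Nat)
    (h : j < (l.takeWhile (· = c)).length) : l[j]? = some c := by
  induction l generalizing j with
  | nil => simp at h
  | cons d rest ih =>
    by_cases hd : d = c
    · subst hd
      rw [List.takeWhile_cons] at h
      simp only [decide_true, if_true, List.length_cons] at h
      cases j with
      | zero => simp
      | succ j' => simpa using ih j' (by omega)
    · simp [hd] at h

theorem tw_stop (l : List Char) (c : Char)
    (h : (l.takeWhile (· = c)).length < l.length) :
    l[(l.takeWhile (· = c)).length]? ≠ some c := by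
  induction l with
  | nil => simp at h
  | cons d rest ih =>
    by_cases hd : d = c
    · subst hd
      simp only [List.takeWhile_cons, decide_true, if_true, List.length_cons,
        List.getElem?_cons_succ] at h ⊢
      exact ih (by omega)
    · simp only [List.takeWhile_cons, hd, decide_false, Bool.false_eq_true, if_false]
      intro hh
      exact hd (Option.some.inj hh)

theorem tw_take (l : List Char) (c : Char) :
    l.take ((l.takeWhile (· = c)).length) = List.replicate ((l.takeWhile (· = c)).length) c := by
  induction l with
  | nil => simp
  | cons d rest ih =>
    by_cases hd : d = c
    · subst hd
      simp only [List.takeWhile_cons, decide_true, if_true, List.length_cons, List.take_succ_cons,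
        List.replicate_succ]
      rw [ih]
    · simp [hd]

theorem tw_cons (rest : List Char) (c : Char) :
    ((c :: rest).takeWhile (· = c)).length = (rest.takeWhile (· = c)).length + 1 := by
  simp

theorem tw_len_le (l : List Char) (c : Char) : (l.takeWhile (· = c)).length ≤ l.length :=
  (List.takeWhile_sublist _).length_le

-- pvCountRun computes count + the length of the run continuing from position i + count
theorem countRun_eq (chars : List Char) (i : Nat) (c : Char) (hc : chars[i]? = some c) :
    ∀ count, pvCountRun chars i count
      = count + ((chars.drop (i + count)).takeWhile (· = c)).length := by
  intro count
  fun_induction pvCountRun chars i count with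
  | case1 count h ih =>
    obtain ⟨hlt, heq⟩ := h
    have hget : chars[i + count]? = some c := by rw [← heq]; exact hc
    have hdrop : chars.drop (i + count) = c :: chars.drop (i + count + 1) := by
      obtain ⟨hl, hv⟩ := List.getElem?_eq_some_iff.mp hget
      rw [List.drop_eq_getElem_cons hl, hv]
    have hi1 : i + (count + 1) = i + count + 1 := by omega
    rw [ih, hdrop, tw_cons, hi1]
    omega
  | case2 count h =>
    rcases Decidable.not_and_iff_not_or_not.mp h with h1 | h2
    · have hnil : chars.drop (i + count) = [] := List.drop_eq_nil_of_le (by omega)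
      simp [hnil]
    · rcases Nat.lt_or_ge (i + count) chars.length with hlt | hge
      · have hdrop : chars.drop (i + count) = chars[i + count] :: chars.drop (i + count + 1) :=
          List.drop_eq_getElem_cons hlt
        have hne : ¬ (chars[i + count] = c) := by
          intro hcontra
          exact h2 (by rw [hc, List.getElem?_eq_getElem hlt, hcontra])
        rw [hdrop]
        simp [hne]
      · have hnil : chars.drop (i + count) = [] := List.drop_eq_nil_of_le hge
        simp [hnil]

-- skipping one whole non-emitted run of pvRuns changes nothing
theorem runs_skip (m : Int) (c : Char) (l : List Char)
    (hm : ¬ ((((l.takeWhile (· = c)).length + 1 : Nat) : Int) > m)) :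
    pvRuns m l = pvRuns m (l.drop ((l.takeWhile (· = c)).length)) := by
  cases l with
  | nil => simp
  | cons d t =>
    by_cases hd : d = c
    · rw [hd] at hm ⊢
      rw [tw_cons] at hm ⊢
      rw [pvRuns_cons]
      have hnoemit : ¬ ((((t.takeWhile (· = c)).length + 1 : Nat) : Int) > m) := by
        push_cast at hm ⊢; omega
      rw [if_neg hnoemit]
      simp only [List.nil_append, List.drop_succ_cons]
    · simp [hd]

-- A's outer loop appends exactly the long runs of the remaining suffix
theorem loopA_eq (chars : List Char) (m : Int) :
    ∀ i acc, pvLoopA chars m i acc = acc ++ pvRuns m (chars.drop i) := by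
  intro i acc
  fun_induction pvLoopA chars m i acc with
  | case1 i acc hi count hgt ih =>
    have hc : chars[i]? = some (chars.getD i ' ') := by
      simp [List.getD, List.getElem?_eq_getElem hi]
    set c := chars.getD i ' ' with hcdef
    have hdrop : chars.drop i = c :: chars.drop (i + 1) := by
      obtain ⟨hl, hv⟩ := List.getElem?_eq_some_iff.mp hc
      rw [List.drop_eq_getElem_cons hl, hv]
    have hcount : count = ((chars.drop (i + 1)).takeWhile (· = c)).length + 1 := by
      have := countRun_eq chars i c hc 1
      simp only [count] at *
      omega
    rw [ih, hdrop, pvRuns_cons, ← hcount, if_pos (by exact_mod_cast hgt)]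
    have hdd : (chars.drop (i + 1)).drop (((chars.drop (i + 1)).takeWhile (· = c)).length)
        = chars.drop (i + count) := by
      rw [List.drop_drop]
      congr 1
      omega
    rw [hdd]
    simp
  | case2 i acc hi count hle ih =>
    have hc : chars[i]? = some (chars.getD i ' ') := by
      simp [List.getD, List.getElem?_eq_getElem hi]
    set c := chars.getD i ' ' with hcdef
    have hdrop : chars.drop i = c :: chars.drop (i + 1) := by
      obtain ⟨hl, hv⟩ := List.getElem?_eq_some_iff.mp hc
      rw [List.drop_eq_getElem_cons hl, hv]
    have hcount : count = ((chars.drop (i + 1)).takeWhile (· = c)).length + 1 := by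
      have := countRun_eq chars i c hc 1
      simp only [count] at *
      omega
    have hnoemit : ¬ ((((chars.drop (i + 1)).takeWhile (· = c)).length + 1 : Nat) : Int) > m := by
      rw [← hcount]; exact hle
    rw [ih, hdrop, pvRuns_cons, if_neg hnoemit]
    simp only [List.nil_append]
    rw [← runs_skip m c _ (by
      push_cast at hnoemit ⊢
      omega)]
  | case3 i acc hge =>
    have hnil : chars.drop i = [] := List.drop_eq_nil_of_le (by omega)
    simp [hnil, pvRuns_nil]

-- a fold whose step fixes the state is the identity
theorem foldl_fixed {α β : Type} (f : β → α → β) (init : β) :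
    ∀ l : List α, (∀ x ∈ l, f init x = init) → l.foldl f init = init := by
  intro l
  induction l with
  | nil => simp
  | cons x t ih =>
    intro h
    rw [List.foldl_cons, h x (by simp)]
    exact ih (fun y hy => h y (by simp [hy]))

-- B's fold, started at the beginning of a run, appends exactly the long runs of the suffix
theorem foldB_eq (chars : List Char) (m : Int) :
    ∀ (t s : Nat) (acc : List String), chars.length - s = t → s < chars.length →
      (((List.range' (s + 1) (chars.length - s)).foldl (pvStepB chars m) (s, acc)).2
        = acc ++ pvRuns m (chars.drop s)) := by
  intro t
  induction t using Nat.strong_induction_on with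
  | _ t ih =>
    intro s acc ht hs
    have hc : chars[s]? = some (chars.getD s ' ') := by
      simp [List.getD, List.getElem?_eq_getElem hs]
    set c := chars.getD s ' ' with hcdef
    have hdropS : chars.drop s = c :: chars.drop (s + 1) := by
      obtain ⟨hl, hv⟩ := List.getElem?_eq_some_iff.mp hc
      rw [List.drop_eq_getElem_cons hl, hv]
    set k := ((chars.drop (s + 1)).takeWhile (· = c)).length with hk
    have hkle : k ≤ chars.length - (s + 1) := by
      have := tw_len_le (chars.drop (s + 1)) c
      simpa using this
    -- split the index range at the end of the run
    have hsplit : List.range' (s + 1) (chars.length - s)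
        = List.range' (s + 1) k ++ List.range' (s + 1 + k) (chars.length - s - k) := by
      have := List.range'_append (s := s + 1) (m := k) (n := chars.length - s - k) (step := 1)
      simp only [one_mul] at this
      rw [this]
      congr 1
      omega
    rw [hsplit, List.foldl_append]
    -- inside the run nothing happens
    have hfix : (List.range' (s + 1) k).foldl (pvStepB chars m) (s, acc) = (s, acc) := by
      apply foldl_fixed
      intro j hj
      rw [List.mem_range'] at hj
      obtain ⟨u, hu, hju⟩ := hj
      have hjval : j = s + 1 + u := by omega
      have hjlt : j < chars.length := by omega
      have hjget : chars[j]? = some c := by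
        have := tw_get (chars.drop (s + 1)) c u (by omega)
        rw [List.getElem?_drop] at this
        rw [hjval]; exact this
      rw [pvStepB, if_neg]
      rintro (h1 | h2)
      · omega
      · exact h2 (by rw [hjget, hc])
    rw [hfix]
    -- the boundary index s + 1 + k fires the step
    have hone : chars.length - s - k = (chars.length - s - k - 1) + 1 := by omega
    rw [hone, List.range'_succ, List.foldl_cons]
    have hcond : (s + 1 + k = chars.length ∨ chars[s + 1 + k]? ≠ chars[(s, acc).1]?) := by
      rcases Nat.lt_or_ge (s + 1 + k) chars.length with hlt | hge
      · right
        have := tw_stop (chars.drop (s + 1)) c (by simpa using (by omega : k < chars.length - (s + 1)))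
        rw [List.getElem?_drop] at this
        simpa [hc] using this
      · left; omega
    have hemit : (if (((s + 1 + k : Nat) : Int) - ((s, acc).1 : Int)) > m
        then (s, acc).2 ++ [String.ofList ((chars.drop (s, acc).1).take (s + 1 + k - (s, acc).1))]
        else (s, acc).2)
        = acc ++ (if ((k + 1 : Nat) : Int) > m then [String.ofList (List.replicate (k + 1) c)] else []) := by
      have htake : (chars.drop s).take (s + 1 + k - s) = List.replicate (k + 1) c := by
        rw [hdropS]
        have : s + 1 + k - s = k + 1 := by omega
        rw [this, List.take_succ_cons, List.replicate_succ]
        congr 1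
        have := tw_take (chars.drop (s + 1)) c
        rw [← hk] at this
        rw [this]
      have hcast : (((s + 1 + k : Nat) : Int) - (s : Int)) = ((k + 1 : Nat) : Int) := by push_cast; omega
      by_cases hgt : ((k + 1 : Nat) : Int) > m
      · rw [if_pos (by rw [hcast]; exact hgt), if_pos hgt]
        simp [htake]
      · rw [if_neg (by rw [hcast]; exact hgt), if_neg hgt]
        simp
    rw [pvStepB, if_pos hcond, hemit]
    -- after the boundary: either we are done, or recurse on the next run
    rcases Nat.lt_or_ge (s + 1 + k) chars.length with hlt | hge
    · have hrest : chars.length - s - k - 1 = chars.length - (s + 1 + k) := by omega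
      rw [hrest]
      have := ih (chars.length - (s + 1 + k)) (by omega) (s + 1 + k)
        (acc ++ (if ((k + 1 : Nat) : Int) > m then [String.ofList (List.replicate (k + 1) c)] else []))
        rfl hlt
      rw [this, hdropS, pvRuns_cons, ← hk]
      rw [List.drop_drop, List.append_assoc]
    · have hzero : chars.length - s - k - 1 = 0 := by omega
      rw [hzero, List.range'_zero, List.foldl_nil]
      have hend : s + 1 + k = chars.length := by omega
      have hnil : chars.drop (s + 1 + k) = [] := List.drop_eq_nil_of_le (by omega)
      rw [hdropS, pvRuns_cons, ← hk]
      rw [List.drop_drop, hnil, pvRuns_nil]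
      simp

theorem find_repeating_chars_py_eq_runs (password : String) (m : Int) :
    find_repeating_chars_py password m = pvRuns m password.toList := by
  rw [find_repeating_chars_py, loopA_eq]
  simp

theorem alt_eq_runs (password : String) (m : Int) :
    find_repeating_chars_py_alt password m = pvRuns m password.toList := by
  by_cases h0 : password.toList.length = 0
  · have hnil : password.toList = [] := List.eq_nil_of_length_eq_zero h0
    simp [find_repeating_chars_py_alt, hnil, pvRuns_nil]
  · have hlen : 0 < password.toList.length := by omega
    have := foldB_eq password.toList m (password.toList.length) 0 [] (by omega) hlen
    simp [find_repeating_chars_py_alt]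
    simpa using this

-- ===== VERDICT (by name: the statement is the Claim_ definition above) =====
theorem find_repeating_chars_py_spec : Claim_equal_find_repeating_chars_py := by
  intro password m _
  unfold Spec_find_repeating_chars_py
  rw [find_repeating_chars_py_eq_runs, alt_eq_runs]
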